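-- pv_equiv track=rewrite | github.com/jayadevgh/PersonalApply | worker/app/adapters/field_matching.py | match_answer_to_option
-- ===== SOURCE A (Python) =====
-- def match_answer_to_option(saved_answer: str, options: list[str]) -> str | None:
--     """Find the best match for saved_answer in a list of option strings.
--     Strategies: exact → containment → first token containment.
--     """
--     if not saved_answer or not options:
--         return None
--     answer_lower = saved_answer.lower().strip()
--
--     for opt in options:
--         if opt.lower().strip() == answer_lower:
--             return opt
--
--     for opt in options:
--         opt_lower = opt.lower().strip()
--         if opt_lower in answer_lower or answer_lower in opt_lower:
--             return opt
--
--     return None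
-- ===== SOURCE B (Python) =====
-- def match_answer_to_option(saved_answer: str, options: list[str]) -> str | None:
--     """Single pass: exact match returns immediately; first containment
--     candidate is remembered and returned if no exact match exists."""
--     if not saved_answer or not options:
--         return None
--     answer_lower = saved_answer.lower().strip()
--     candidate = None
--     for opt in options:
--         opt_lower = opt.lower().strip()
--         if opt_lower == answer_lower:
--             return opt
--         if candidate is None and (opt_lower in answer_lower or answer_lower in opt_lower):
--             candidate = opt
--     return candidate
-- ===== Notes on version B (the rewrite author's own statement) =====
-- stated objective: alternative
-- what changed: Replaced A's two sequential scans (exact pass, then containment pass) by a single pass that returns an exact match immediately and remembers the first containment candidate in one accumulator.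
import Mathlib
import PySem

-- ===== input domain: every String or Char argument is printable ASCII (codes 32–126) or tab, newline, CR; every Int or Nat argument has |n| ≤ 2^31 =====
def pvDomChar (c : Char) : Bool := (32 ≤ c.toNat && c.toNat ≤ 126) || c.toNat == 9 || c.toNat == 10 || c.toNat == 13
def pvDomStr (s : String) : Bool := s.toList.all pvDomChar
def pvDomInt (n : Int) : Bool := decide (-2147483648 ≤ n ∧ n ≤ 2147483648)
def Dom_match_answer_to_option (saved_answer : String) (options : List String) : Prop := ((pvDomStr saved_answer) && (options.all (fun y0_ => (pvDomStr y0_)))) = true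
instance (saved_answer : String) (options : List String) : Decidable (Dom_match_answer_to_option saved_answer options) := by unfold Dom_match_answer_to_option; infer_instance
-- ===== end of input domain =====

-- B replaces A's two sequential scans by a single pass that returns an exact match
-- immediately and remembers the first containment candidate (objective: alternative,
-- one traversal instead of up to two).

-- ===== PORT A =====
-- opt.lower().strip()
def pvANorm (s : String) : String := PySem.Str.strip (PySem.Str.lower s)

-- first loop of A: return the first exact (normalized) match
def pvALoop1 (al : String) : List String → Option String
  | [] => none
  | o :: rest => if pvANorm o == al then some o else pvALoop1 al rest

-- second loop of A: return the first containment match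
def pvALoop2 (al : String) : List String → Option String
  | [] => none
  | o :: rest =>
      let ol := pvANorm o
      if PySem.Str.isIn ol al || PySem.Str.isIn al ol then some o else pvALoop2 al rest

def match_answer_to_option (saved_answer : String) (options : List String) : Option String :=
  if saved_answer == "" || options == [] then none
  else
    let al := pvANorm saved_answer
    match pvALoop1 al options with
    | some o => some o
    | none => pvALoop2 al options

-- ===== PORT B =====
-- single pass: exact match returns at once, first containment candidate is kept in `cand`
def pvBLoop (al : String) : List String → Option String → Option String
  | [], cand => cand
  | o :: rest, cand =>
      let ol := PySem.Str.strip (PySem.Str.lower o)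
      if ol == al then some o
      else if cand == none && (PySem.Str.isIn ol al || PySem.Str.isIn al ol) then
        pvBLoop al rest (some o)
      else pvBLoop al rest cand

def match_answer_to_option_alt (saved_answer : String) (options : List String) : Option String :=
  if saved_answer == "" || options == [] then none
  else pvBLoop (PySem.Str.strip (PySem.Str.lower saved_answer)) options none

-- ===== PRECONDITION & SPEC =====
def Spec_match_answer_to_option (saved_answer : String) (options : List String) (out : Option String) : Prop := out = match_answer_to_option_alt saved_answer options
instance (saved_answer : String) (options : List String) (out : Option String) : Decidable (Spec_match_answer_to_option saved_answer options out) := by unfold Spec_match_answer_to_option; infer_instance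

-- ===== CLAIM (what is proved, stated in full; the proofs are below) =====
def Claim_equal_match_answer_to_option : Prop := ∀ (saved_answer : String) (options : List String), Dom_match_answer_to_option saved_answer options → Spec_match_answer_to_option saved_answer options (match_answer_to_option saved_answer options)

-- ===== LEMMAS AND PROOFS =====

-- the single pass equals: exact scan, else the recorded candidate, else the containment scan
theorem pvBLoop_eq (al : String) (opts : List String) :
    ∀ cand : Option String,
      pvBLoop al opts cand =
        match pvALoop1 al opts with
        | some o => some o
        | none => match cand with
                  | some c => some c
                  | none => pvALoop2 al opts := by
  induction opts with
  | nil => intro cand; cases cand <;> rfl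
  | cons o rest ih =>
    intro cand
    simp only [pvBLoop, pvALoop1, pvALoop2, pvANorm]
    by_cases hx : (PySem.Str.strip (PySem.Str.lower o) == al) = true
    · rw [if_pos hx, if_pos hx]
    · rw [if_neg hx, if_neg hx]
      cases cand with
      | some c =>
        rw [show ((some c == (none : Option String)) &&
            (PySem.Str.isIn (PySem.Str.strip (PySem.Str.lower o)) al ||
             PySem.Str.isIn al (PySem.Str.strip (PySem.Str.lower o)))) = false from rfl]
        rw [if_neg (by simp), ih]
      | none =>
        by_cases hc : (PySem.Str.isIn (PySem.Str.strip (PySem.Str.lower o)) al ||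
            PySem.Str.isIn al (PySem.Str.strip (PySem.Str.lower o))) = true
        · rw [if_pos (by simpa using hc), if_pos hc, ih]
        · rw [if_neg (by simpa using hc), if_neg hc, ih]

-- ===== VERDICT (by name: the statement is the Claim_ definition above) =====
theorem match_answer_to_option_spec : Claim_equal_match_answer_to_option := by
  intro sa opts _
  unfold Spec_match_answer_to_option match_answer_to_option match_answer_to_option_alt
  by_cases hg : sa = "" ∨ opts = []
  · rw [if_pos (by simpa using hg), if_pos (by simpa using hg)]
  · rw [if_neg (by simpa using hg), if_neg (by simpa using hg), pvBLoop_eq]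
    rfl
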